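-- pv_equiv track=rewrite | github.com/brennomachado/USP-Disciplinas | MAC0115/EP7/brennoPMep7.py | comparaDoisNomes
-- ===== SOURCE A (Python) =====
-- def maiuscula(carac):
--     """ (str) -> str
--         Recebe um caractere carac e se carac é uma letra minúscula, retorna
--         a letra maiúscula correspondente; em caso contrário, retorna carac.
--     """
--     minusculas = "abcdefghijklmnopqrstuvwxyzáàãâéêíóôúç"
--     maiusculas = "ABCDEFGHIJKLMNOPQRSTUVWXYZAAAAEEIOOUC"
--
--     for i in range(0, len(minusculas), 1):
--         if carac[0] == minusculas[i]:
--             return maiusculas[i]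
--     return carac
--
-- def criaStringMaiuscula(s):
--     """ (str) -> str
--         Recebe um string s e cria um novo string, a partir de s, substituindo
--         todas as letras minúsculas por letras maiúsculas correspondentes.
--         Retorna o string criado.
--         Observação: Esta função utiliza a função maiúscula.
--     """
--     frase = ""
--     comp = len(s)
--     for i in range(0, comp, 1):
--         frase = frase + maiuscula(s[i])
--
--     return frase
--
-- def comparaDoisNomes(nome1, nome2):
--     """ (str, str) -> int
--         Recebe dois strings, representando dois nomes completos, e retorna 0,
--         se os dois nomes forem iguais; retorna -1, se nome1 deve vir antes do nome2
--         (na ordem alfabética) e retorna 1, se nome2 deve vir antes do nome1.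
--         Observação: A partir de nome1 e nome2, a função cria dois novos strings
--         com todas as letras maiúsculas, utilizando a função criaStringMaiuscula,
--         e compara esses novos strings, sı́mbolo por sı́mbolo, para decidir se são
--         iguais ou qual deles "é menor".
--     """
--     nome1_maiusculo = criaStringMaiuscula(nome1)
--     nome2_maiusculo = criaStringMaiuscula(nome2)
--
--     comp1 = len(nome1_maiusculo)
--     comp2 = len(nome2_maiusculo)
--     if comp1 < comp2:
--         comp = comp1
--     else:
--         comp = comp2
--
--     for i in range(0, comp, 1):
--         if nome1_maiusculo[i] < nome2_maiusculo[i]: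
--             return -1
--         elif nome1_maiusculo[i] > nome2_maiusculo[i]:
--             return 1
--
--     return 0
-- ===== SOURCE B (Python) =====
-- # B: same custom uppercase map kept in a dict; single interleaved pass over both
-- # names up to the shorter length with early exit, instead of building both
-- # uppercased strings first and then comparing (objective: simpler).
--
-- _UPPER = dict(zip("abcdefghijklmnopqrstuvwxyz\u00e1\u00e0\u00e3\u00e2\u00e9\u00ea\u00ed\u00f3\u00f4\u00fa\u00e7",
--                   "ABCDEFGHIJKLMNOPQRSTUVWXYZAAAAEEIOOUC"))
--
-- def comparaDoisNomes(nome1, nome2):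
--     for c1, c2 in zip(nome1, nome2):
--         u1 = _UPPER.get(c1, c1)
--         u2 = _UPPER.get(c2, c2)
--         if u1 < u2:
--             return -1
--         if u2 < u1:
--             return 1
--     return 0
-- ===== Notes on version B (the rewrite author's own statement) =====
-- stated objective: simpler
-- what changed: B keeps the custom uppercase map in a dict built once and compares the two names in a single interleaved pass over the shorter length with early exit, instead of A's two-pass build-both-uppercased-strings-then-index-loop structure (per-character 37-step alphabet scan replaced by one dict lookup).
import Mathlib
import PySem

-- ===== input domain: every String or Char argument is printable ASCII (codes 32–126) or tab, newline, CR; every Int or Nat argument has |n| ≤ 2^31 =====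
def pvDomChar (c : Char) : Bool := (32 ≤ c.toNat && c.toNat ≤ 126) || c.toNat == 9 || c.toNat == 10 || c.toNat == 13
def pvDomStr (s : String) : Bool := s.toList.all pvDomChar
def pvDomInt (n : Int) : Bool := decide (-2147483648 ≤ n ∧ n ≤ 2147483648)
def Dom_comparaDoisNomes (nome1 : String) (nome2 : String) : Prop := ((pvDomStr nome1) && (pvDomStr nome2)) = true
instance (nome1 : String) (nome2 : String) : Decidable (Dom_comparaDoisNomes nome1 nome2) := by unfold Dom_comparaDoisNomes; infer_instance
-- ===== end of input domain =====

-- B replaces A's build-both-uppercased-strings-then-compare structure by a single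
-- interleaved pass over the shorter length (dict lookup per character, early exit);
-- objective: simpler. Same custom accent map, same min-length behaviour.

-- ===== PORT A =====
def pvMinusculas : List Char := "abcdefghijklmnopqrstuvwxyzáàãâéêíóôúç".toList
def pvMaiusculas : List Char := "ABCDEFGHIJKLMNOPQRSTUVWXYZAAAAEEIOOUC".toList

-- A's 'for i in range(len(minusculas)): if carac == minusculas[i]: return maiusculas[i]'
-- as the obvious structural recursion over the two parallel character lists.
def pvMaiusculaLoop : List Char → List Char → Char → Char
  | m :: ms, u :: us, c => if c == m then u else pvMaiusculaLoop ms us c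
  | _, _, c => c

def maiusculaA (c : Char) : Char := pvMaiusculaLoop pvMinusculas pvMaiusculas c

-- 'frase = ""; for i in range(len(s)): frase = frase + maiuscula(s[i])'
def criaStringMaiusculaA (s : List Char) : List Char :=
  s.foldl (fun frase c => frase ++ [maiusculaA c]) []

-- A's final 'for i in range(comp)' index loop over the two uppercased strings
-- (comp = min of the lengths) as the structural recursion on both lists at once.
def pvCmpLoopA : List Char → List Char → Int
  | a :: as, b :: bs =>
      if a < b then -1 else if b < a then 1 else pvCmpLoopA as bs
  | _, _ => 0

def comparaDoisNomes (nome1 : String) (nome2 : String) : Int :=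
  pvCmpLoopA (criaStringMaiusculaA nome1.toList) (criaStringMaiusculaA nome2.toList)

-- ===== PORT B =====
-- _UPPER = dict(zip(minusculas, maiusculas))
def pvUpperDict : PySem.Dict Char Char :=
  PySem.Dict.ofList (List.zip "abcdefghijklmnopqrstuvwxyzáàãâéêíóôúç".toList
                              "ABCDEFGHIJKLMNOPQRSTUVWXYZAAAAEEIOOUC".toList)

-- 'for c1, c2 in zip(nome1, nome2): …' with per-character dict lookup and early exit.
def pvGoB : List Char → List Char → Int
  | c1 :: t1, c2 :: t2 =>
      let u1 := pvUpperDict.getD c1 c1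
      let u2 := pvUpperDict.getD c2 c2
      if u1 < u2 then -1 else if u2 < u1 then 1 else pvGoB t1 t2
  | _, _ => 0

def comparaDoisNomes_alt (nome1 : String) (nome2 : String) : Int :=
  pvGoB nome1.toList nome2.toList

-- ===== PRECONDITION & SPEC =====
def Spec_comparaDoisNomes (nome1 : String) (nome2 : String) (out : Int) : Prop := out = comparaDoisNomes_alt nome1 nome2
instance (nome1 : String) (nome2 : String) (out : Int) : Decidable (Spec_comparaDoisNomes nome1 nome2 out) := by unfold Spec_comparaDoisNomes; infer_instance

-- ===== CLAIM (what is proved, stated in full; the proofs are below) =====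
def Claim_equal_comparaDoisNomes : Prop := ∀ (nome1 : String) (nome2 : String), Dom_comparaDoisNomes nome1 nome2 → Spec_comparaDoisNomes nome1 nome2 (comparaDoisNomes nome1 nome2)

-- ===== LEMMAS AND PROOFS =====

-- the dict built from the zipped alphabet strings stores exactly those pairs
lemma pvUpperDict_items : pvUpperDict.items = List.zip pvMinusculas pvMaiusculas := by decide

-- A's linear scan of the two parallel lists is first-match lookup in their zip
lemma pvMaiusculaLoop_eq_find (ms us : List Char) (c : Char) :
    pvMaiusculaLoop ms us c
      = (((List.zip ms us).find? (fun p => p.1 == c)).map (fun p => p.2)).getD c := by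
  induction ms generalizing us with
  | nil => cases us <;> simp [pvMaiusculaLoop]
  | cons m ms ih =>
    cases us with
    | nil => simp [pvMaiusculaLoop]
    | cons u us =>
      rcases eq_or_ne c m with h | h
      · subst h; simp [pvMaiusculaLoop]
      · have hm : (m == c) = false := by simp [h.symm]
        simp [pvMaiusculaLoop, h, hm, ih]

-- A's character map = B's dict lookup with default
lemma maiusculaA_eq_getD (c : Char) : maiusculaA c = pvUpperDict.getD c c := by
  simp only [PySem.Dict.getD, PySem.Dict.get?, pvUpperDict_items, maiusculaA,
    pvMaiusculaLoop_eq_find]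

lemma criaStringMaiusculaA_eq_map (s : List Char) :
    criaStringMaiusculaA s = s.map maiusculaA := by
  simpa [criaStringMaiusculaA] using PySem.List.foldl_append_singleton_eq_map maiusculaA s

-- comparing the two fully-mapped lists = mapping on the fly while comparing
lemma pvCmpLoopA_map_eq_pvGoB (l1 l2 : List Char) :
    pvCmpLoopA (l1.map maiusculaA) (l2.map maiusculaA) = pvGoB l1 l2 := by
  induction l1 generalizing l2 with
  | nil => cases l2 <;> simp [pvCmpLoopA, pvGoB]
  | cons a t1 ih =>
    cases l2 with
    | nil => simp [pvCmpLoopA, pvGoB]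
    | cons b t2 => simp [pvCmpLoopA, pvGoB, maiusculaA_eq_getD, ih]

-- ===== VERDICT (by name: the statement is the Claim_ definition above) =====
theorem comparaDoisNomes_spec : Claim_equal_comparaDoisNomes := by
  intro nome1 nome2 _
  unfold Spec_comparaDoisNomes comparaDoisNomes comparaDoisNomes_alt
  rw [criaStringMaiusculaA_eq_map, criaStringMaiusculaA_eq_map,
    pvCmpLoopA_map_eq_pvGoB]
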